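-- pv_equiv track=rewrite | github.com/SherzodOtajonov/cp-stuff | codeforces/2020/Educational/round_101_div2/red_and_blue.py | solve
-- ===== SOURCE A (Python) =====
-- def solve(r, b):
--     blue = red = bt = rt = 0
--     for i in range(max(len(r), len(b))):
--         if i < len(r):
--             rt += r[i]
--             red = max(red, rt)
--         if i < len(b):
--             bt += b[i]
--             blue = max(blue, bt)
--     return red + blue
-- ===== SOURCE B (Python) =====
-- def solve(r, b):
--     # Backward clamp recurrence: the best (0-floored) prefix sum of x::xs is
--     # max(0, x + best(xs)), so one right-to-left pass with a single state
--     # variable suffices -- no running totals, no materialized prefix sums.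
--     def best(xs):
--         m = 0
--         for x in reversed(xs):
--             m = max(0, x + m)
--         return m
--     return best(r) + best(b)
-- ===== Notes on version B (the rewrite author's own statement) =====
-- stated objective: alternative
-- what changed: Replaced A's forward interleaved loop maintaining running totals and running maxima (four state variables) with a backward clamp recurrence per array: best(x::xs) = max(0, x + best(xs)), one right-to-left pass with a single state variable and no prefix sums or totals at all.
import Mathlib
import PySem

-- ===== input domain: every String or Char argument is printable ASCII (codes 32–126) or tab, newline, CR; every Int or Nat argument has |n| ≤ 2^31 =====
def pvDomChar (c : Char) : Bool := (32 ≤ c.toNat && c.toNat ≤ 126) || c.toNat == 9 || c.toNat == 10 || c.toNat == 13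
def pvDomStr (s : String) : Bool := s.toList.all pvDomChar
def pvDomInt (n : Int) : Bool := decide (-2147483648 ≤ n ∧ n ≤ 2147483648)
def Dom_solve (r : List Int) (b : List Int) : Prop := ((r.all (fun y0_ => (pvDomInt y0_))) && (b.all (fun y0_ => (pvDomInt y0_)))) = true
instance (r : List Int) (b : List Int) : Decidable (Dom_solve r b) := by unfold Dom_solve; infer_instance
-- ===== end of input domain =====

-- B replaces A's forward interleaved loop (running totals + running maxima) with a
-- backward clamp recurrence per array: best(x::xs) = max(0, x + best(xs)); same exact result.


-- ===== PORT A =====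
-- the loop over i < max(len r, len b): each step consumes r[i] (if any) and b[i]
-- (if any), updating (blue, red, bt, rt); four cases mirror the two if-guards
def solveLoop : List Int → List Int → Int → Int → Int → Int → Int
  | [], [], blue, red, _bt, _rt => red + blue
  | x :: xs, [], blue, red, bt, rt => solveLoop xs [] blue (max red (rt + x)) bt (rt + x)
  | [], y :: ys, blue, red, bt, rt => solveLoop [] ys (max blue (bt + y)) red (bt + y) rt
  | x :: xs, y :: ys, blue, red, bt, rt =>
      solveLoop xs ys (max blue (bt + y)) (max red (rt + x)) (bt + y) (rt + x)

def solve (r : List Int) (b : List Int) : Int := solveLoop r b 0 0 0 0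

-- ===== PORT B =====
-- Source B's best: fold over reversed(xs) with m := max(0, x + m), starting at 0
def best (xs : List Int) : Int := xs.reverse.foldl (fun m x => max 0 (x + m)) 0

def solve_alt (r : List Int) (b : List Int) : Int := best r + best b

-- ===== PRECONDITION & SPEC =====
def Spec_solve (r : List Int) (b : List Int) (out : Int) : Prop := out = solve_alt r b
instance (r : List Int) (b : List Int) (out : Int) : Decidable (Spec_solve r b out) := by unfold Spec_solve; infer_instance

-- ===== CLAIM =====
def Claim_equal_solve : Prop := ∀ (r : List Int) (b : List Int), Dom_solve r b → Spec_solve r b (solve r b)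

-- ===== LEMMAS AND PROOFS =====
-- the backward fold as a structural recursion
def fr : List Int → Int
  | [] => 0
  | x :: xs => max 0 (x + fr xs)

theorem best_eq_fr (xs : List Int) : best xs = fr xs := by
  have h : ∀ l : List Int, l.foldr (fun x m => max 0 (x + m)) 0 = fr l := by
    intro l; induction l with
    | nil => simp [fr]
    | cons x xs ih => simp [fr, ih]
  simpa [best, List.foldl_reverse] using h xs

theorem fr_nonneg (xs : List Int) : 0 ≤ fr xs := by
  cases xs with
  | nil => simp [fr]
  | cons x xs => simp [fr]

-- A's per-array accumulator pair (running max `m`, running total `t`) versus fr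
theorem one_side (xs : List Int) : ∀ (m t : Int), t ≤ m →
    (xs.foldl (fun (p : Int × Int) x => (max p.1 (p.2 + x), p.2 + x)) (m, t)).1
      = max m (t + fr xs) := by
  induction xs with
  | nil => intro m t h; simp [fr]; omega
  | cons x xs ih =>
    intro m t h
    simp only [List.foldl, fr]
    rw [ih (max m (t + x)) (t + x) (le_max_right _ _)]
    have := fr_nonneg xs
    omega

-- A's interleaved loop splits into the two independent folds
theorem solveLoop_eq (xs ys : List Int) (blue red bt rt : Int) :
    solveLoop xs ys blue red bt rt =
      (xs.foldl (fun (p : Int × Int) x => (max p.1 (p.2 + x), p.2 + x)) (red, rt)).1 +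
      (ys.foldl (fun (p : Int × Int) x => (max p.1 (p.2 + x), p.2 + x)) (blue, bt)).1 := by
  induction xs generalizing ys blue red bt rt with
  | nil =>
    induction ys generalizing blue bt with
    | nil => simp [solveLoop]
    | cons y ys ih => simp [solveLoop, List.foldl, ih]
  | cons x xs ih =>
    cases ys with
    | nil => simp [solveLoop, List.foldl, ih]
    | cons y ys => simp [solveLoop, List.foldl, ih]

-- ===== VERDICT =====
theorem solve_spec : Claim_equal_solve := by
  intro r b _
  unfold Spec_solve solve solve_alt
  rw [solveLoop_eq, one_side r 0 0 le_rfl, one_side b 0 0 le_rfl,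
      best_eq_fr, best_eq_fr]
  have hr := fr_nonneg r
  have hb := fr_nonneg b
  omega
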